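-- pv_equiv track=rewrite | github.com/crisweber2600/Lens.Core.Src | _bmad/lens-work/scripts/lens_yaml.py | _fold_block_scalar
-- ===== SOURCE A (Python) =====
-- def _fold_block_scalar(lines: list[str]) -> str:
--     """Implement YAML folded-scalar (`>`) behavior with blank lines preserved as paragraph breaks."""
--     paragraphs: list[str] = []
--     current: list[str] = []
--     for line in lines:
--         if line == "":
--             if current:
--                 paragraphs.append(" ".join(part.strip() for part in current))
--                 current = []
--             paragraphs.append("")
--             continue
--         current.append(line)
--     if current:
--         paragraphs.append(" ".join(part.strip() for part in current))
--     return "\n".join(paragraphs)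
-- ===== SOURCE B (Python) =====
-- def _fold_block_scalar(lines: list[str]) -> str:
--     """Fold YAML `>` scalar: scan by maximal runs instead of a flushed accumulator."""
--     out: list[str] = []
--     i = 0
--     n = len(lines)
--     while i < n:
--         if lines[i] == "":
--             out.append("")
--             i += 1
--         else:
--             j = i
--             while j < n and lines[j] != "":
--                 j += 1
--             out.append(" ".join(s.strip() for s in lines[i:j]))
--             i = j
--     return "\n".join(out)
-- ===== Notes on version B (the rewrite author's own statement) =====
-- stated objective: alternative
-- what changed: Replaces A's single pass with a flushed 'current' accumulator by an index loop over maximal non-blank runs: each run is sliced out and joined in one step, blanks are emitted directly; no paragraph buffer is maintained.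
import Mathlib
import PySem

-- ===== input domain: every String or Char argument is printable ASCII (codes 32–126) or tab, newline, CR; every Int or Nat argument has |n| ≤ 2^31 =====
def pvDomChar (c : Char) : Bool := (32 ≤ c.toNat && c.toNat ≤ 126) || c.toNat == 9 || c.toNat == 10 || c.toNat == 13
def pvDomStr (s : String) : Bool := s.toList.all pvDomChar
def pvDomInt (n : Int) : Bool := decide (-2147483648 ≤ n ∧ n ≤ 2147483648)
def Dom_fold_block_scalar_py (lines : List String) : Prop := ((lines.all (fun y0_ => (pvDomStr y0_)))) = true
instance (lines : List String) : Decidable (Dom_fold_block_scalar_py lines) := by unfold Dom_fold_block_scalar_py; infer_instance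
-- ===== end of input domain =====

-- B replaces A's flushed 'current' accumulator by a direct scan over maximal non-blank runs (alternative decomposition, same cost).

-- ===== PORT A =====
-- " ".join(part.strip() for part in cur)  (shared by both Pythons verbatim)
def pvJoinPara (cur : List String) : String := PySem.Str.join " " (cur.map PySem.Str.strip)

-- one iteration of A's for-loop over the state (paragraphs, current)
def pvStepA (st : List String × List String) (line : String) : List String × List String :=
  if line = "" then
    ((if st.2 ≠ [] then st.1 ++ [pvJoinPara st.2] else st.1) ++ [""], [])
  else (st.1, st.2 ++ [line])

def fold_block_scalar_py (lines : List String) : String :=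
  let st := lines.foldl pvStepA ([], [])
  let paragraphs := if st.2 ≠ [] then st.1 ++ [pvJoinPara st.2] else st.1
  PySem.Str.join "\n" paragraphs

-- ===== PORT B =====
-- B's outer while-loop over index i, one step per blank line or per maximal non-blank run
-- (the inner while computing j and the slice lines[i:j] are the takeWhile/dropWhile of the suffix)
def pvRunsB : List String → List String
  | [] => []
  | l :: rest =>
    if l = "" then "" :: pvRunsB rest
    else pvJoinPara (l :: rest.takeWhile (· ≠ "")) :: pvRunsB (rest.dropWhile (· ≠ ""))
termination_by ls => ls.length
decreasing_by
  · simp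
  · have := List.length_dropWhile_le (fun s => decide (s ≠ "")) rest
    simp at this ⊢; omega

def fold_block_scalar_py_alt (lines : List String) : String :=
  PySem.Str.join "\n" (pvRunsB lines)

-- ===== PRECONDITION & SPEC =====
def Spec_fold_block_scalar_py (lines : List String) (out : String) : Prop := out = fold_block_scalar_py_alt lines
instance (lines : List String) (out : String) : Decidable (Spec_fold_block_scalar_py lines out) := by unfold Spec_fold_block_scalar_py; infer_instance

-- ===== CLAIM (what is proved, stated in full; the proofs are below) =====
def Claim_equal_fold_block_scalar_py : Prop := ∀ (lines : List String), Dom_fold_block_scalar_py lines → Spec_fold_block_scalar_py lines (fold_block_scalar_py lines)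

-- ===== LEMMAS AND PROOFS =====

-- A's loop, written as structural recursion over (current, remaining lines), producing the paragraph list
def pvParasA : List String → List String → List String
  | cur, [] => if cur = [] then [] else [pvJoinPara cur]
  | cur, l :: rest =>
    if l = "" then (if cur = [] then [] else [pvJoinPara cur]) ++ "" :: pvParasA [] rest
    else pvParasA (cur ++ [l]) rest

-- the foldl-plus-final-flush of port A equals pvParasA
theorem pvFoldA_eq (lines : List String) : ∀ (ps cur : List String),
    (let st := lines.foldl pvStepA (ps, cur);
     if st.2 ≠ [] then st.1 ++ [pvJoinPara st.2] else st.1) = ps ++ pvParasA cur lines := by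
  induction lines with
  | nil =>
    intro ps cur
    simp only [List.foldl, pvParasA]
    by_cases h : cur = [] <;> simp [h]
  | cons l rest ih =>
    intro ps cur
    simp only [List.foldl, pvStepA, pvParasA]
    by_cases hl : l = ""
    · by_cases hc : cur = [] <;> simp [hl, hc, ih]
    · simp [hl, ih]

theorem pvTakeWhile_all {cs : List String} (h : ∀ s ∈ cs, s ≠ "") :
    cs.takeWhile (fun x => !decide (x = "")) = cs := by
  induction cs with
  | nil => rfl
  | cons c cs ih =>
    have hc : c ≠ "" := h c (by simp)
    have hcs : ∀ s ∈ cs, s ≠ "" := fun s hs => h s (List.mem_cons_of_mem _ hs)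
    simp [List.takeWhile_cons, hc, ih hcs]

theorem pvDropWhile_all {cs : List String} (h : ∀ s ∈ cs, s ≠ "") :
    cs.dropWhile (fun x => !decide (x = "")) = [] := by
  induction cs with
  | nil => rfl
  | cons c cs ih =>
    have hc : c ≠ "" := h c (by simp)
    have hcs : ∀ s ∈ cs, s ≠ "" := fun s hs => h s (List.mem_cons_of_mem _ hs)
    simp [List.dropWhile_cons, hc, ih hcs]

theorem pvTakeWhile_append {cs ys : List String} (h : ∀ s ∈ cs, s ≠ "") :
    (cs ++ ys).takeWhile (fun x => !decide (x = "")) = cs ++ ys.takeWhile (fun x => !decide (x = "")) := by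
  induction cs with
  | nil => rfl
  | cons c cs ih =>
    have hc : c ≠ "" := h c (by simp)
    have hcs : ∀ s ∈ cs, s ≠ "" := fun s hs => h s (List.mem_cons_of_mem _ hs)
    simp [List.takeWhile_cons, hc, ih hcs]

theorem pvDropWhile_append {cs ys : List String} (h : ∀ s ∈ cs, s ≠ "") :
    (cs ++ ys).dropWhile (fun x => !decide (x = "")) = ys.dropWhile (fun x => !decide (x = "")) := by
  induction cs with
  | nil => rfl
  | cons c cs ih =>
    have hc : c ≠ "" := h c (by simp)
    have hcs : ∀ s ∈ cs, s ≠ "" := fun s hs => h s (List.mem_cons_of_mem _ hs)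
    simp [List.dropWhile_cons, hc, ih hcs]

-- A's recursion with accumulator cur (all non-blank) computes pvRunsB of cur ++ lines
theorem pvParasA_eq_runs (lines : List String) : ∀ (cur : List String),
    (∀ s ∈ cur, s ≠ "") → pvParasA cur lines = pvRunsB (cur ++ lines) := by
  induction lines with
  | nil =>
    intro cur hcur
    cases cur with
    | nil => simp [pvParasA, pvRunsB]
    | cons c cs =>
      have hc : c ≠ "" := hcur c (by simp)
      have hcs : ∀ s ∈ cs, s ≠ "" := fun s hs => hcur s (by simp [hs])
      simp only [pvParasA, List.append_nil, pvRunsB]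
      simp [hc, pvTakeWhile_all hcs, pvDropWhile_all hcs, pvRunsB]
  | cons l rest ih =>
    intro cur hcur
    by_cases hl : l = ""
    · subst hl
      cases cur with
      | nil => simp [pvParasA, pvRunsB, ih [] (by simp)]
      | cons c cs =>
        have hc : c ≠ "" := hcur c (by simp)
        have hcs : ∀ s ∈ cs, s ≠ "" := fun s hs => hcur s (by simp [hs])
        simp only [pvParasA, List.cons_append, pvRunsB]
        simp [hc, pvTakeWhile_append hcs, pvDropWhile_append hcs,
          List.takeWhile_cons, List.dropWhile_cons, pvRunsB, ih [] (by simp)]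
    · have hcur' : ∀ s ∈ cur ++ [l], s ≠ "" := by
        intro s hs
        rcases List.mem_append.1 hs with h | h
        · exact hcur s h
        · simp at h; simp [h, hl]
      have := ih (cur ++ [l]) hcur'
      simp only [pvParasA, hl, if_neg hl, List.append_assoc] at this ⊢
      simpa using this

-- ===== VERDICT (by name: the statement is the Claim_ definition above) =====
theorem fold_block_scalar_py_spec : Claim_equal_fold_block_scalar_py := by
  intro lines _
  unfold Spec_fold_block_scalar_py fold_block_scalar_py fold_block_scalar_py_alt
  have h1 := pvFoldA_eq lines [] []
  have h2 := pvParasA_eq_runs lines [] (by simp)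
  simp only [List.nil_append] at h1 h2
  simp [h1, h2]
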